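-- pv_equiv track=rewrite | github.com/BrainsyETH/OpenClaw-Scan | api/scanner_integration.py | _calculate_verdict
-- ===== SOURCE A (Python) =====
-- from typing import Dict, List, Optional
--
-- def _calculate_verdict(findings: List[Dict]) -> str:
--     """
--     Calculate overall verdict based on findings
--
--     Priority: CRITICAL > HIGH > MEDIUM > LOW > SAFE
--     """
--     if not findings:
--         return "SAFE"
--
--     severities = [f.get("severity", "UNKNOWN") for f in findings]
--
--     if "CRITICAL" in severities:
--         return "CRITICAL"
--     elif "HIGH" in severities:
--         return "HIGH"
--     elif "MEDIUM" in severities: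
--         return "MEDIUM"
--     elif "LOW" in severities:
--         return "LOW"
--     else:
--         return "SAFE"
-- ===== SOURCE B (Python) =====
-- _RANK = {"CRITICAL": 0, "HIGH": 1, "MEDIUM": 2, "LOW": 3}
-- _LABELS = ["CRITICAL", "HIGH", "MEDIUM", "LOW", "SAFE"]
--
-- def _calculate_verdict(findings):
--     best = 4
--     for f in findings:
--         best = min(best, _RANK.get(f.get("severity", "UNKNOWN"), 4))
--     return _LABELS[best]
-- ===== Notes on version B (the rewrite author's own statement) =====
-- stated objective: idiomatic
-- what changed: Replaces the list comprehension plus four separate 'in severities' membership scans by a single min-rank pass over the findings using a severity->priority dict, indexing a label table at the end.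
import Mathlib
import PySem

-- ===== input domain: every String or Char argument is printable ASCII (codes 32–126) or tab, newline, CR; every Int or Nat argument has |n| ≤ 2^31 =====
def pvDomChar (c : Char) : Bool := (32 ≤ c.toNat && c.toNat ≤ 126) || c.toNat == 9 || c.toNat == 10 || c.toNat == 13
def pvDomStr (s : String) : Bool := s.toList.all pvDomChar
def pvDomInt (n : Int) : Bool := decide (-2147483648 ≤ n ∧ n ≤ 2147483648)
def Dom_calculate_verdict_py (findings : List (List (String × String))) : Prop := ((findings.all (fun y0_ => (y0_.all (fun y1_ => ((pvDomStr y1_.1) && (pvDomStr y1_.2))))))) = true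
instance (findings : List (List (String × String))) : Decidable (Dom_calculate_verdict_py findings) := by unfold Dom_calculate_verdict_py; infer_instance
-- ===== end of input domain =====

-- B replaces A's comprehension + four 'in severities' scans by a single min-rank pass
-- with a severity->priority dict and a label table (idiomatic; same return value).

-- ===== PORT A =====
def calculate_verdict_py (findings : List (List (String × String))) : String :=
  if findings = [] then "SAFE"
  else
    let severities := findings.map (fun f => (PySem.Dict.mk f).getD "severity" "UNKNOWN")
    if severities.contains "CRITICAL" then "CRITICAL"
    else if severities.contains "HIGH" then "HIGH"
    else if severities.contains "MEDIUM" then "MEDIUM"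
    else if severities.contains "LOW" then "LOW"
    else "SAFE"

-- ===== PORT B =====
def pvRankOf (s : String) : Nat :=
  (PySem.Dict.ofList [("CRITICAL", 0), ("HIGH", 1), ("MEDIUM", 2), ("LOW", 3)]).getD s 4

def calculate_verdict_py_alt (findings : List (List (String × String))) : String :=
  let best := findings.foldl
    (fun b f => min b (pvRankOf ((PySem.Dict.mk f).getD "severity" "UNKNOWN"))) 4
  ["CRITICAL", "HIGH", "MEDIUM", "LOW", "SAFE"].getD best "SAFE"

-- ===== PRECONDITION & SPEC =====
def Spec_calculate_verdict_py (findings : List (List (String × String))) (out : String) : Prop := out = calculate_verdict_py_alt findings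
instance (findings : List (List (String × String))) (out : String) : Decidable (Spec_calculate_verdict_py findings out) := by unfold Spec_calculate_verdict_py; infer_instance

-- ===== CLAIM (what is proved, stated in full; the proofs are below) =====
def Claim_equal_calculate_verdict_py : Prop := ∀ (findings : List (List (String × String))), Dom_calculate_verdict_py findings → Spec_calculate_verdict_py findings (calculate_verdict_py findings)

-- ===== LEMMAS AND PROOFS =====

theorem pvRankOf_eq (s : String) :
    pvRankOf s = if s = "CRITICAL" then 0 else if s = "HIGH" then 1
      else if s = "MEDIUM" then 2 else if s = "LOW" then 3 else 4 := by
  have hd : PySem.Dict.ofList [("CRITICAL", (0:Nat)), ("HIGH", 1), ("MEDIUM", 2), ("LOW", 3)]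
      = PySem.Dict.mk [("CRITICAL", 0), ("HIGH", 1), ("MEDIUM", 2), ("LOW", 3)] := by decide
  simp only [pvRankOf, hd, PySem.Dict.getD_eq_get?_getD, PySem.Dict.get?_mk_cons]
  by_cases h1 : s = "CRITICAL"
  · simp [h1]
  · by_cases h2 : s = "HIGH"
    · simp [h2, h1]
    · by_cases h3 : s = "MEDIUM"
      · simp [h3, h1, h2]
      · by_cases h4 : s = "LOW"
        · simp [h4, h1, h2, h3]
        · simp [if_neg (Ne.symm h1), if_neg (Ne.symm h2), if_neg (Ne.symm h3),
            if_neg (Ne.symm h4), PySem.Dict.get?, h1, h2, h3, h4]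
def pvSev (f : List (String × String)) : String := (PySem.Dict.mk f).getD "severity" "UNKNOWN"
def pvM (fs : List (List (String × String))) : Nat :=
  fs.foldl (fun b f => min b (pvRankOf (pvSev f))) 4
theorem pvM_foldl_min (fs : List (List (String × String))) :
    ∀ a b : Nat, fs.foldl (fun b f => min b (pvRankOf (pvSev f))) (min a b)
      = min a (fs.foldl (fun b f => min b (pvRankOf (pvSev f))) b) := by
  induction fs with
  | nil => intro a b; simp
  | cons f fs ih =>
      intro a b
      simp only [List.foldl_cons, min_assoc]
      exact ih a (min b (pvRankOf (pvSev f)))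
theorem pvM_cons (f : List (String × String)) (fs : List (List (String × String))) :
    pvM (f :: fs) = min (pvRankOf (pvSev f)) (pvM fs) := by
  have h := pvM_foldl_min fs (pvRankOf (pvSev f)) 4
  simpa [pvM, min_comm] using h
theorem pvRankOf_eq' (s : String) :
    pvRankOf s = if "CRITICAL" = s then 0 else if "HIGH" = s then 1
      else if "MEDIUM" = s then 2 else if "LOW" = s then 3 else 4 := by
  by_cases h1 : s = "CRITICAL"
  · simp [pvRankOf_eq, h1]
  · by_cases h2 : s = "HIGH"
    · simp [pvRankOf_eq, h2]
    · by_cases h3 : s = "MEDIUM"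
      · simp [pvRankOf_eq, h3]
      · by_cases h4 : s = "LOW"
        · simp [pvRankOf_eq, h4]
        · simp [pvRankOf_eq, h1, h2, h3, h4,
            Ne.symm h1, Ne.symm h2, Ne.symm h3, Ne.symm h4]
theorem pvM_char (fs : List (List (String × String))) :
    pvM fs =
      if (fs.map pvSev).contains "CRITICAL" then 0
      else if (fs.map pvSev).contains "HIGH" then 1
      else if (fs.map pvSev).contains "MEDIUM" then 2
      else if (fs.map pvSev).contains "LOW" then 3
      else 4 := by
  induction fs with
  | nil => simp [pvM]
  | cons f fs ih =>
      rw [pvM_cons, ih, pvRankOf_eq']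
      simp only [List.map_cons, List.contains_cons]
      cases hc0 : (fs.map pvSev).contains "CRITICAL" <;>
        cases hc1 : (fs.map pvSev).contains "HIGH" <;>
        cases hc2 : (fs.map pvSev).contains "MEDIUM" <;>
        cases hc3 : (fs.map pvSev).contains "LOW" <;>
        by_cases h1 : "CRITICAL" = pvSev f <;>
        by_cases h2 : "HIGH" = pvSev f <;>
        by_cases h3 : "MEDIUM" = pvSev f <;>
        by_cases h4 : "LOW" = pvSev f <;>
        simp [hc0, hc1, hc2, hc3, h1, h2, h3, h4, beq_iff_eq, Nat.min_def]

-- ===== VERDICT (by name: the statement is the Claim_ definition above) =====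
theorem calculate_verdict_py_spec : Claim_equal_calculate_verdict_py := by
  intro findings _
  unfold Spec_calculate_verdict_py calculate_verdict_py calculate_verdict_py_alt
  have hm : findings.foldl
      (fun b f => min b (pvRankOf ((PySem.Dict.mk f).getD "severity" "UNKNOWN"))) 4
      = pvM findings := rfl
  rw [hm, pvM_char]
  cases findings with
  | nil => rfl
  | cons f fs =>
      have hsev : (f :: fs).map (fun f => (PySem.Dict.mk f).getD "severity" "UNKNOWN")
          = (f :: fs).map pvSev := rfl
      simp only [hsev, reduceCtorEq, if_false]
      split_ifs <;> rfl
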